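-- pv_equiv track=rewrite | github.com/KDDIN/Python_euler | Ejercicios projecteuler/5_Divisible1Y20.py | Aumento
-- ===== SOURCE A (Python) =====
-- def Aumento (numero):
--     divisor = 1
--     resto = numero
--     while divisor <= 20:
--         resto %= divisor
--         if resto != 0:
--             return False
--
--         divisor += 1
--         resto = numero
--
--     return True
-- ===== SOURCE B (Python) =====
-- def Aumento(numero):
--     # closed form: divisible by every 1..20 iff divisible by lcm(1..20) = 232792560
--     return numero % 232792560 == 0
-- ===== Notes on version B (the rewrite author's own statement) =====
-- stated objective: simpler
-- what changed: Replaces the trial-division while loop over each divisor with a single modulo test against the hardcoded least common multiple 232792560 of the first twenty positive integers.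
import Mathlib
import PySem

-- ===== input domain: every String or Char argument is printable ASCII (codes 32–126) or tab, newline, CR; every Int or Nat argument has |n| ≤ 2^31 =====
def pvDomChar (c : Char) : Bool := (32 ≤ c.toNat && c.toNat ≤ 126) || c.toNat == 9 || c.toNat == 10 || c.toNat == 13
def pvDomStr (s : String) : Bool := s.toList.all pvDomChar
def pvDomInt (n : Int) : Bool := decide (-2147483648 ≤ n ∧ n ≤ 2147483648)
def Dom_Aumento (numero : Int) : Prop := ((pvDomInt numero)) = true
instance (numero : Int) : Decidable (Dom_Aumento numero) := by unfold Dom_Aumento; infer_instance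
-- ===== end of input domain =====

-- B replaces A's 20-step trial-division loop by one modulo test against LCM(1..20); objective: simpler.

-- ===== PORT A =====
-- literal port of the while loop: state (divisor, resto), fuel bounds the ≤ 20 iterations
def AumentoLoop (numero : Int) (divisor : Int) (fuel : Nat) : Bool :=
  match fuel with
  | 0 => true
  | fuel + 1 =>
    if divisor ≤ 20 then
      let resto := PySem.Int.mod numero divisor
      if resto ≠ 0 then false
      else AumentoLoop numero (divisor + 1) fuel
    else true

def Aumento (numero : Int) : Bool := AumentoLoop numero 1 20

-- ===== PORT B =====
def Aumento_alt (numero : Int) : Bool := PySem.Int.mod numero 232792560 == 0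

-- ===== PRECONDITION & SPEC =====
def Spec_Aumento (numero : Int) (out : Bool) : Prop := out = Aumento_alt numero
instance (numero : Int) (out : Bool) : Decidable (Spec_Aumento numero out) := by unfold Spec_Aumento; infer_instance

-- ===== CLAIM (what is proved, stated in full; the proofs are below) =====
def Claim_equal_Aumento : Prop := ∀ (numero : Int), Dom_Aumento numero → Spec_Aumento numero (Aumento numero)

-- ===== LEMMAS AND PROOFS =====

theorem dvd_lcm_fwd (n : Int) (h16 : (16:Int) ∣ n) (h9 : (9:Int) ∣ n) (h5 : (5:Int) ∣ n)
    (h7 : (7:Int) ∣ n) (h11 : (11:Int) ∣ n) (h13 : (13:Int) ∣ n)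
    (h17 : (17:Int) ∣ n) (h19 : (19:Int) ∣ n) : (232792560:Int) ∣ n := by
  have step : ∀ a b : Int, Int.gcd a b = 1 → a ∣ n → b ∣ n → a * b ∣ n :=
    fun a b hg ha hb => (Int.isCoprime_iff_gcd_eq_one.mpr hg).mul_dvd ha hb
  have h144 := step 16 9 (by decide) h16 h9
  have h720 := step 144 5 (by decide) (by norm_num at h144 ⊢; exact h144) h5
  have h5040 := step 720 7 (by decide) (by norm_num at h720 ⊢; exact h720) h7
  have h55440 := step 5040 11 (by decide) (by norm_num at h5040 ⊢; exact h5040) h11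
  have h720720 := step 55440 13 (by decide) (by norm_num at h55440 ⊢; exact h55440) h13
  have h12252240 := step 720720 17 (by decide) (by norm_num at h720720 ⊢; exact h720720) h17
  have hfin := step 12252240 19 (by decide) (by norm_num at h12252240 ⊢; exact h12252240) h19
  norm_num at hfin ⊢; exact hfin

theorem dvd_lcm_bwd (n k : Int) (h : (232792560:Int) ∣ n) (h1 : 1 ≤ k) (h2 : k ≤ 20) : k ∣ n := by
  interval_cases k <;> exact dvd_trans (by norm_num) h

theorem loop_iff (n : Int) : ∀ (fuel : Nat) (d : Int), d + fuel = 21 →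
    (AumentoLoop n d fuel = true ↔ ∀ k : Int, d ≤ k → k ≤ 20 → k ∣ n) := by
  intro fuel
  induction fuel with
  | zero =>
    intro d hd
    simp only [AumentoLoop]
    constructor
    · intro _ k hk1 hk2; omega
    · intro _; trivial
  | succ f ih =>
    intro d hd
    have hdle : d ≤ 20 := by omega
    simp only [AumentoLoop, if_pos hdle]
    by_cases hm : PySem.Int.mod n d = 0
    · rw [if_neg (by simp [hm])]
      rw [ih (d + 1) (by omega)]
      have hdvd : d ∣ n := (PySem.Int.mod_eq_zero_iff_dvd n d).mp hm
      constructor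
      · intro h k hk1 hk2
        rcases eq_or_lt_of_le hk1 with h' | h'
        · exact h' ▸ hdvd
        · exact h k (by omega) hk2
      · intro h k hk1 hk2; exact h k (by omega) hk2
    · rw [if_pos (by simp [hm])]
      constructor
      · intro h; exact absurd h (by simp)
      · intro h
        exact absurd ((PySem.Int.mod_eq_zero_iff_dvd n d).mpr (h d le_rfl hdle)) hm

set_option maxHeartbeats 2000000 in
theorem Aumento_eq (n : Int) : Aumento n = Aumento_alt n := by
  have hiff : (Aumento n = true) ↔ (Aumento_alt n = true) := by
    unfold Aumento Aumento_alt
    rw [loop_iff n 20 1 (by omega)]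
    simp only [beq_iff_eq, PySem.Int.mod_eq_zero_iff_dvd]
    constructor
    · intro h
      exact dvd_lcm_fwd n (h 16 (by omega) (by omega)) (h 9 (by omega) (by omega))
        (h 5 (by omega) (by omega)) (h 7 (by omega) (by omega)) (h 11 (by omega) (by omega))
        (h 13 (by omega) (by omega)) (h 17 (by omega) (by omega)) (h 19 (by omega) (by omega))
    · intro h k hk1 hk2
      exact dvd_lcm_bwd n k h hk1 hk2
  cases hA : Aumento n <;> cases hB : Aumento_alt n <;> simp_all

-- ===== VERDICT (by name: the statement is the Claim_ definition above) =====
theorem Aumento_spec : Claim_equal_Aumento := by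
  intro n _
  unfold Spec_Aumento
  exact Aumento_eq n
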